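-- pv_equiv track=rewrite | github.com/AbhishekParanjape/AHMA-Strands-Agent | pdf/process_insurance_pdf_smart.py | detect_form_type
-- ===== SOURCE A (Python) =====
-- from typing import Optional, Dict, Any
--
-- def detect_form_type(fields_json: Dict[str, Any]) -> str:
--     """
--     Detect the form type based on field names.
--     Returns: 'health_declaration', 'medical_claim', or 'unknown'
--     """
--     field_names = list(fields_json.keys())
--     field_names_lower = [name.lower() for name in field_names]
--
--     # Health declaration indicators
--     health_indicators = [
--         'policy no', 'nric', 'passport no', 'countryregion code',
--         'surrender penalty', 'reinstatement'
--     ]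
--
--     # Medical/Accident claim indicators
--     medical_indicators = [
--         'accident', 'medical', 'hospital', 'diagnosis', 'symptoms',
--         'disability', 'benefit', 'claim number', 'policy numbers'
--     ]
--
--     health_score = sum(1 for indicator in health_indicators
--                       if any(indicator in field for field in field_names_lower))
--     medical_score = sum(1 for indicator in medical_indicators
--                        if any(indicator in field for field in field_names_lower))
--
--     if health_score > medical_score and health_score > 0:
--         return 'health_declaration'
--     elif medical_score > 0:
--         return 'medical_claim'
--     else:
--         return 'unknown'
-- ===== SOURCE B (Python) =====
-- from typing import Optional, Dict, Any
--
-- def detect_form_type(fields_json: Dict[str, Any]) -> str: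
--     """
--     Detect the form type based on field names.
--     Returns: 'health_declaration', 'medical_claim', or 'unknown'
--     """
--     health_indicators = [
--         'policy no', 'nric', 'passport no', 'countryregion code',
--         'surrender penalty', 'reinstatement'
--     ]
--     medical_indicators = [
--         'accident', 'medical', 'hospital', 'diagnosis', 'symptoms',
--         'disability', 'benefit', 'claim number', 'policy numbers'
--     ]
--     matched_health = set()
--     matched_medical = set()
--     # single pass over the fields, collecting the distinct indicators matched
--     for name in fields_json.keys():
--         field = name.lower()
--         for indicator in health_indicators:
--             if indicator in field:
--                 matched_health.add(indicator)
--         for indicator in medical_indicators: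
--             if indicator in field:
--                 matched_medical.add(indicator)
--     health_score = len(matched_health)
--     medical_score = len(matched_medical)
--     if health_score > medical_score and health_score > 0:
--         return 'health_declaration'
--     elif medical_score > 0:
--         return 'medical_claim'
--     else:
--         return 'unknown'
-- ===== Notes on version B (the rewrite author's own statement) =====
-- stated objective: alternative
-- what changed: B inverts the loop nesting: one pass over the fields (instead of one scan of all fields per indicator) collecting the distinct matched indicators into two sets, whose sizes are the scores.
import Mathlib
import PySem

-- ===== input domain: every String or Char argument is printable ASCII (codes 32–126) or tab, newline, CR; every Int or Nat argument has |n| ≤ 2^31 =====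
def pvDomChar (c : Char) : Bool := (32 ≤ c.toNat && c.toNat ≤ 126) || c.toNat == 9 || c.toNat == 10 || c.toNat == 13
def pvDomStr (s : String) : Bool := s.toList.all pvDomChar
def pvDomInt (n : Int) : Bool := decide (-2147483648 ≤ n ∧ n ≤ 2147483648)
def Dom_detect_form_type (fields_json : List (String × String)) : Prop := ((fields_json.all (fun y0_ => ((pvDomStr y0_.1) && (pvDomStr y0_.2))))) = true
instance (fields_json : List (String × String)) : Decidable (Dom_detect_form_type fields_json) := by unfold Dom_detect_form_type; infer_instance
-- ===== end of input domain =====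

-- B inverts the loop nesting: one pass over the fields collecting the distinct matched
-- indicators into two sets whose sizes are the scores (alternative decomposition, same cost).


-- the two indicator lists (shared literal constants)
def pvHealthInds : List String :=
  ["policy no", "nric", "passport no", "countryregion code", "surrender penalty", "reinstatement"]
def pvMedicalInds : List String :=
  ["accident", "medical", "hospital", "diagnosis", "symptoms", "disability", "benefit",
   "claim number", "policy numbers"]

-- ===== PORT A =====
def detect_form_type (fields_json : List (String × String)) : String :=
  let field_names := fields_json.map (fun kv => kv.1)
  let field_names_lower := field_names.map (fun name => PySem.Str.lower name)
  let health_score : Int := (pvHealthInds.map (fun ind =>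
      if field_names_lower.any (fun field => PySem.Str.isIn ind field) then (1 : Int) else 0)).sum
  let medical_score : Int := (pvMedicalInds.map (fun ind =>
      if field_names_lower.any (fun field => PySem.Str.isIn ind field) then (1 : Int) else 0)).sum
  if health_score > medical_score ∧ health_score > 0 then "health_declaration"
  else if medical_score > 0 then "medical_claim"
  else "unknown"

-- ===== PORT B =====
-- inner loop of B: add every indicator that occurs in `field` to the set
def pvAddMatches (s : PySem.Set String) (inds : List String) (field : String) : PySem.Set String :=
  inds.foldl (fun s ind => if PySem.Str.isIn ind field then PySem.Set.add s ind else s) s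

def detect_form_type_alt (fields_json : List (String × String)) : String :=
  let p := fields_json.foldl
      (fun (p : PySem.Set String × PySem.Set String) kv =>
        let field := PySem.Str.lower kv.1
        (pvAddMatches p.1 pvHealthInds field, pvAddMatches p.2 pvMedicalInds field))
      (PySem.Set.empty, PySem.Set.empty)
  let health_score : Int := PySem.Set.len p.1
  let medical_score : Int := PySem.Set.len p.2
  if health_score > medical_score ∧ health_score > 0 then "health_declaration"
  else if medical_score > 0 then "medical_claim"
  else "unknown"

-- ===== PRECONDITION & SPEC =====
def Spec_detect_form_type (fields_json : List (String × String)) (out : String) : Prop := out = detect_form_type_alt fields_json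
instance (fields_json : List (String × String)) (out : String) : Decidable (Spec_detect_form_type fields_json out) := by unfold Spec_detect_form_type; infer_instance

-- ===== CLAIM (what is proved, stated in full; the proofs are below) =====
def Claim_equal_detect_form_type : Prop := ∀ (fields_json : List (String × String)), Dom_detect_form_type fields_json → Spec_detect_form_type fields_json (detect_form_type fields_json)

-- ===== LEMMAS AND PROOFS =====

-- membership in B's inner loop result
theorem mem_pvAddMatches (s : PySem.Set String) (inds : List String) (field : String) (y : String) :
    y ∈ pvAddMatches s inds field ↔ y ∈ s ∨ (y ∈ inds ∧ PySem.Str.isIn y field = true) := by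
  induction inds generalizing s with
  | nil => simp [pvAddMatches]
  | cons i t ih =>
    simp only [pvAddMatches, List.foldl_cons] at *
    rw [ih]
    by_cases h : PySem.Str.isIn i field = true
    · simp only [h, if_pos, PySem.Set.mem_add, List.mem_cons]
      constructor
      · rintro (⟨hs | rfl⟩ | h2)
        · exact Or.inl hs
        · exact Or.inr ⟨Or.inl rfl, h⟩
        · exact Or.inr ⟨Or.inr h2.1, h2.2⟩
      · rintro (hs | ⟨rfl | hm, hin⟩)
        · exact Or.inl (Or.inl hs)
        · exact Or.inl (Or.inr rfl)
        · exact Or.inr ⟨hm, hin⟩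
    · simp only [h, List.mem_cons]
      constructor
      · rintro (hs | h2)
        · exact Or.inl hs
        · exact Or.inr ⟨Or.inr h2.1, h2.2⟩
      · rintro (hs | ⟨rfl | hm, hin⟩)
        · exact Or.inl hs
        · exact absurd hin h
        · exact Or.inr ⟨hm, hin⟩

theorem nodup_pvAddMatches (s : PySem.Set String) (inds : List String) (field : String)
    (hs : s.Nodup) : (pvAddMatches s inds field).Nodup := by
  induction inds generalizing s with
  | nil => simpa [pvAddMatches] using hs
  | cons i t ih =>
    simp only [pvAddMatches, List.foldl_cons] at *
    split
    · exact ih _ (PySem.Set.nodup_add s i hs)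
    · exact ih _ hs

-- one component of B's fold
def pvFoldSet (fields : List (String × String)) (inds : List String) (s : PySem.Set String) :
    PySem.Set String :=
  fields.foldl (fun s kv => pvAddMatches s inds (PySem.Str.lower kv.1)) s

theorem mem_pvFoldSet (fields : List (String × String)) (inds : List String)
    (s : PySem.Set String) (y : String) :
    y ∈ pvFoldSet fields inds s ↔
      y ∈ s ∨ (y ∈ inds ∧ ∃ kv ∈ fields, PySem.Str.isIn y (PySem.Str.lower kv.1) = true) := by
  induction fields generalizing s with
  | nil => simp [pvFoldSet]
  | cons kv t ih =>
    simp only [pvFoldSet, List.foldl_cons] at *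
    rw [ih, mem_pvAddMatches]
    constructor
    · rintro ((hs | ⟨hm, hin⟩) | ⟨hm, w, hw, hiw⟩)
      · exact Or.inl hs
      · exact Or.inr ⟨hm, kv, List.mem_cons_self, hin⟩
      · exact Or.inr ⟨hm, w, List.mem_cons_of_mem _ hw, hiw⟩
    · rintro (hs | ⟨hm, w, hw, hiw⟩)
      · exact Or.inl (Or.inl hs)
      · rcases List.mem_cons.mp hw with rfl | hw'
        · exact Or.inl (Or.inr ⟨hm, hiw⟩)
        · exact Or.inr ⟨hm, w, hw', hiw⟩

theorem nodup_pvFoldSet (fields : List (String × String)) (inds : List String)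
    (s : PySem.Set String) (hs : s.Nodup) : (pvFoldSet fields inds s).Nodup := by
  induction fields generalizing s with
  | nil => simpa [pvFoldSet] using hs
  | cons kv t ih =>
    simp only [pvFoldSet, List.foldl_cons] at *
    exact ih _ (nodup_pvAddMatches _ _ _ hs)

-- B's paired fold splits into the two independent component folds
theorem fold_pair_eq (fields : List (String × String)) (a b : PySem.Set String) :
    fields.foldl
      (fun (p : PySem.Set String × PySem.Set String) kv =>
        let field := PySem.Str.lower kv.1
        (pvAddMatches p.1 pvHealthInds field, pvAddMatches p.2 pvMedicalInds field))
      (a, b)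
    = (pvFoldSet fields pvHealthInds a, pvFoldSet fields pvMedicalInds b) := by
  induction fields generalizing a b with
  | nil => rfl
  | cons kv t ih =>
    simp only [List.foldl_cons, pvFoldSet] at *
    exact ih _ _

-- the size of the matched-indicator set equals A's count of matched indicators
theorem len_pvFoldSet (fields : List (String × String)) (inds : List String) (hn : inds.Nodup) :
    (pvFoldSet fields inds PySem.Set.empty).length
      = List.countP (fun ind =>
          (fields.map (fun kv => kv.1)).map (fun name => PySem.Str.lower name)
            |>.any (fun field => PySem.Str.isIn ind field)) inds := by
  rw [List.countP_eq_length_filter]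
  have hperm : (pvFoldSet fields inds PySem.Set.empty).Perm
      (inds.filter (fun ind =>
        (fields.map (fun kv => kv.1)).map (fun name => PySem.Str.lower name)
          |>.any (fun field => PySem.Str.isIn ind field))) := by
    rw [List.perm_ext_iff_of_nodup (nodup_pvFoldSet fields inds PySem.Set.empty (by decide)) (List.Nodup.filter _ hn)]
    intro y
    rw [mem_pvFoldSet, List.mem_filter]
    simp only [PySem.Set.empty, List.any_eq_true, List.mem_map, List.not_mem_nil, false_or]
    constructor
    · rintro ⟨hm, w, hw, hiw⟩
      exact ⟨hm, _, ⟨_, ⟨w, hw, rfl⟩, rfl⟩, hiw⟩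
    · rintro ⟨hm, f, ⟨nm, ⟨w, hw, rfl⟩, rfl⟩, hif⟩
      exact ⟨hm, w, hw, hif⟩
  exact hperm.length_eq

-- ===== VERDICT (by name: the statement is the Claim_ definition above) =====
theorem detect_form_type_spec : Claim_equal_detect_form_type := by
  intro fields _
  unfold Spec_detect_form_type detect_form_type detect_form_type_alt
  rw [fold_pair_eq]
  have hH := len_pvFoldSet fields pvHealthInds (by decide)
  have hM := len_pvFoldSet fields pvMedicalInds (by decide)
  simp only [PySem.Set.len, PySem.List.sum_map_ite_one_zero, hH, hM]
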